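-- pv_equiv track=rewrite | github.com/HiteshG/deepGTA | deepgta/refinement/refiner.py | _find_consecutive_segments
-- ===== SOURCE A (Python) =====
-- from typing import Dict, List, Optional, Tuple
--
-- def _find_consecutive_segments(times: List[int]) -> List[Tuple[int, int]]:
--     """Find consecutive frame segments.
--
--     Args:
--         times: List of frame numbers
--
--     Returns:
--         List of (start_idx, end_idx) tuples
--     """
--     if not times:
--         return []
--
--     segments = []
--     start_idx = 0
--     end_idx = 0
--
--     for i in range(1, len(times)):
--         if times[i] == times[end_idx] + 1:
--             end_idx = i
--         else:
--             segments.append((start_idx, end_idx))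
--             start_idx = i
--             end_idx = i
--
--     segments.append((start_idx, end_idx))
--     return segments
-- ===== SOURCE B (Python) =====
-- from typing import Dict, List, Optional, Tuple
--
-- def _find_consecutive_segments(times: List[int]) -> List[Tuple[int, int]]:
--     """Find consecutive frame segments (boundary-list formulation).
--
--     Returns:
--         List of (start_idx, end_idx) tuples
--     """
--     if not times:
--         return []
--     bounds = [0] + [i for i in range(1, len(times)) if times[i] != times[i - 1] + 1] + [len(times)]
--     return [(bounds[k], bounds[k + 1] - 1) for k in range(len(bounds) - 1)]
-- ===== Notes on version B (the rewrite author's own statement) =====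
-- stated objective: alternative
-- what changed: Replaces the incremental start_idx/end_idx state machine with a two-phase computation: first collect the run-boundary indices in one pass, then form the segments by pairing consecutive boundaries.
import Mathlib
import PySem

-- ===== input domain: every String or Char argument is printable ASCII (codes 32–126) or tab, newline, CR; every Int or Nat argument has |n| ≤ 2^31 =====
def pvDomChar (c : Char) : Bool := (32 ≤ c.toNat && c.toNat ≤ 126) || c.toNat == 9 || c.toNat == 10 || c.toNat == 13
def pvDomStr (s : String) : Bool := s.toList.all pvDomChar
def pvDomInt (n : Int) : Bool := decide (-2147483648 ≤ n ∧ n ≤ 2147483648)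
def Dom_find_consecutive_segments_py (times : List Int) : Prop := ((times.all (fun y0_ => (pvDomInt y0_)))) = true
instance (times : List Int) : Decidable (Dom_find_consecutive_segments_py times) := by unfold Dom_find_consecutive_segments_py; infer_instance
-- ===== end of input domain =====

-- B computes the same segments via a boundary-list two-phase decomposition instead of A's incremental state machine (objective: alternative).


-- ===== PORT A =====
def find_consecutive_segments_py (times : List Int) : List (Int × Int) :=
  if times = [] then []
  else
    -- state = (segments, start_idx, end_idx)
    let r := (PySem.List.pyRange 1 times.length 1).foldl
      (fun (st : List (Int × Int) × Int × Int) i =>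
        if PySem.List.pyGetD times i 0 = PySem.List.pyGetD times st.2.2 0 + 1 then
          (st.1, st.2.1, i)
        else
          (st.1 ++ [(st.2.1, st.2.2)], i, i))
      ([], 0, 0)
    r.1 ++ [(r.2.1, r.2.2)]

-- ===== PORT B =====
def find_consecutive_segments_py_alt (times : List Int) : List (Int × Int) :=
  if times = [] then []
  else
    let bounds : List Int :=
      [0] ++ (PySem.List.pyRange 1 times.length 1).filter
        (fun i => decide (PySem.List.pyGetD times i 0 ≠ PySem.List.pyGetD times (i - 1) 0 + 1))
      ++ [(times.length : Int)]
    (PySem.List.pyRange 0 ((bounds.length : Int) - 1) 1).map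
      (fun k => (PySem.List.pyGetD bounds k 0, PySem.List.pyGetD bounds (k + 1) 0 - 1))

-- ===== PRECONDITION & SPEC =====
def Spec_find_consecutive_segments_py (times : List Int) (out : List (Int × Int)) : Prop := out = find_consecutive_segments_py_alt times
instance (times : List Int) (out : List (Int × Int)) : Decidable (Spec_find_consecutive_segments_py times out) := by unfold Spec_find_consecutive_segments_py; infer_instance

-- ===== CLAIM (what is proved, stated in full; the proofs are below) =====
def Claim_equal_find_consecutive_segments_py : Prop := ∀ (times : List Int), Dom_find_consecutive_segments_py times → Spec_find_consecutive_segments_py times (find_consecutive_segments_py times)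

-- ===== LEMMAS AND PROOFS =====

-- segments formed from a start index, a list of break indices, and the total length
def pvSegsOf (s : Int) (bs : List Int) (n : Int) : List (Int × Int) :=
  match bs with
  | [] => [(s, n - 1)]
  | b :: rest => (s, b - 1) :: pvSegsOf b rest n

-- the break indices in [a, n)
def pvBreaks (times : List Int) (a n : Int) : List Int :=
  (PySem.List.pyRange a n 1).filter
    (fun i => decide (PySem.List.pyGetD times i 0 ≠ PySem.List.pyGetD times (i - 1) 0 + 1))

-- A's final append, as a function of the fold state
def pvFinish (r : List (Int × Int) × Int × Int) : List (Int × Int) :=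
  r.1 ++ [(r.2.1, r.2.2)]

lemma pvBreaks_cons_skip (times : List Int) (a n : Int) (hlt : a < n)
    (hc : PySem.List.pyGetD times a 0 = PySem.List.pyGetD times (a - 1) 0 + 1) :
    pvBreaks times a n = pvBreaks times (a + 1) n := by
  unfold pvBreaks
  rw [PySem.List.pyRange_one_cons hlt, List.filter_cons]
  simp [hc]

lemma pvBreaks_cons_break (times : List Int) (a n : Int) (hlt : a < n)
    (hc : ¬ PySem.List.pyGetD times a 0 = PySem.List.pyGetD times (a - 1) 0 + 1) :
    pvBreaks times a n = a :: pvBreaks times (a + 1) n := by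
  unfold pvBreaks
  rw [PySem.List.pyRange_one_cons hlt, List.filter_cons]
  simp [hc]

-- A's fold, characterised: starting at index a with end_idx = a - 1
lemma pvA_fold (times : List Int) (n : Int) :
    ∀ (k : Nat) (a : Int), (n - a).toNat ≤ k → 1 ≤ a → a ≤ n →
    ∀ (segs : List (Int × Int)) (s : Int),
    pvFinish ((PySem.List.pyRange a n 1).foldl
        (fun (st : List (Int × Int) × Int × Int) i =>
          if PySem.List.pyGetD times i 0 = PySem.List.pyGetD times st.2.2 0 + 1 then
            (st.1, st.2.1, i)
          else
            (st.1 ++ [(st.2.1, st.2.2)], i, i))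
        (segs, s, a - 1)) = segs ++ pvSegsOf s (pvBreaks times a n) n := by
  intro k
  induction k with
  | zero =>
    intro a hk ha1 han segs s
    have : a = n := by omega
    subst this
    simp [PySem.List.pyRange_one_eq_nil, pvBreaks, pvSegsOf, pvFinish]
  | succ k ih =>
    intro a hk ha1 han segs s
    by_cases hlt : a < n
    · rw [PySem.List.pyRange_one_cons hlt, List.foldl_cons]
      have ha : a + 1 - 1 = a := by omega
      dsimp only
      by_cases hc : PySem.List.pyGetD times a 0 = PySem.List.pyGetD times (a - 1) 0 + 1
      · rw [if_pos hc, pvBreaks_cons_skip times a n hlt hc]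
        have := ih (a + 1) (by omega) (by omega) (by omega) segs s
        rw [ha] at this
        exact this
      · rw [if_neg hc, pvBreaks_cons_break times a n hlt hc]
        have := ih (a + 1) (by omega) (by omega) (by omega) (segs ++ [(s, a - 1)]) a
        rw [ha] at this
        rw [this]
        simp [pvSegsOf]
    · have : a = n := by omega
      subst this
      simp [PySem.List.pyRange_one_eq_nil, pvBreaks, pvSegsOf, pvFinish]

-- B's index-pairing over a nonempty bounds list is zip with the tail
lemma pvB_pairs (l : List Int) (x : Int) (ls : List Int) (hl : l = x :: ls) :
    (PySem.List.pyRange 0 ((l.length : Int) - 1) 1).map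
      (fun k => (PySem.List.pyGetD l k 0, PySem.List.pyGetD l (k + 1) 0 - 1))
    = (l.zip ls).map (fun p => (p.1, p.2 - 1)) := by
  subst hl
  rw [PySem.List.pyRange_one]
  apply List.ext_getElem
  · simp only [List.length_map, List.length_range, List.length_zip, List.length_cons]
    omega
  · intro i h1 h2
    simp only [List.getElem_map, List.getElem_range, List.getElem_zip]
    have hi : i < ls.length := by
      simp [List.length_zip] at h2; omega
    have h0 : (0 : Int) + (i : Int) = (i : Int) := by ring
    rw [h0]
    have h1' : ((i : Int) + 1) = ((i + 1 : Nat) : Int) := by push_cast; ring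
    rw [h1']
    simp only [PySem.List.pyGetD_natCast]
    rw [List.getD_eq_getElem _ _ (by simp; omega), List.getD_eq_getElem _ _ (by simp; omega)]
    simp

-- zip-with-tail of (x :: bs ++ [n]) is pvSegsOf
lemma pvZip_segs (x : Int) (bs : List Int) (n : Int) :
    (((x :: bs ++ [n]).zip (bs ++ [n])).map (fun p => (p.1, p.2 - 1))) = pvSegsOf x bs n := by
  induction bs generalizing x with
  | nil => simp [pvSegsOf]
  | cons b rest ih =>
    simp only [List.cons_append, List.zip_cons_cons, List.map_cons, pvSegsOf]
    exact congrArg ((x, b - 1) :: ·) (ih b)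

-- ===== VERDICT (by name: the statement is the Claim_ definition above) =====
theorem find_consecutive_segments_py_spec : Claim_equal_find_consecutive_segments_py := by
  intro times _
  unfold Spec_find_consecutive_segments_py find_consecutive_segments_py find_consecutive_segments_py_alt
  by_cases h : times = []
  · simp [h]
  · simp only [if_neg h]
    have hn : 1 ≤ (times.length : Int) := by
      have : times.length ≠ 0 := by simpa [List.length_eq_zero_iff] using h
      omega
    have hA := pvA_fold times (times.length : Int) (((times.length : Int) - 1).toNat) 1
      (by omega) (by omega) hn [] 0
    have h11 : (1 : Int) - 1 = 0 := by norm_num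
    rw [h11] at hA
    unfold pvFinish at hA
    rw [hA]
    have hB := pvB_pairs ([0] ++ pvBreaks times 1 (times.length : Int) ++ [(times.length : Int)])
      0 (pvBreaks times 1 (times.length : Int) ++ [(times.length : Int)]) (by simp)
    simp only [pvBreaks] at hB ⊢
    simp only [List.singleton_append] at hB ⊢
    rw [hB, pvZip_segs]
    simp
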